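-- pv_equiv track=rewrite | github.com/tugotpwnd/doctransmittal | doctransmittal_sub/ui/register_tab.py | _alpha_prev
-- ===== SOURCE A (Python) =====
-- import string
--
-- _ALPHA = string.ascii_uppercase
--
-- def _alpha_prev(tok: str) -> str:
--     """A -> A (clamp), B -> A, AA -> Z, AB -> AA, etc."""
--     s = ''.join([c for c in (tok or '').upper() if c.isalpha()])
--     if not s:
--         return 'A'
--     # decode base-26 (A=1 .. Z=26)
--     n = 0
--     for ch in s:
--         n = n * 26 + (_ALPHA.index(ch) + 1)
--     if n <= 1:
--         return 'A'
--     n -= 1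
--     out = []
--     while n > 0:
--         n, rem = divmod(n - 1, 26)
--         out.append(_ALPHA[rem])
--     return ''.join(reversed(out))
-- ===== SOURCE B (Python) =====
-- def _alpha_prev(tok):
--     """A -> A (clamp), B -> A, AA -> Z, AB -> AA, etc."""
--     s = [c for c in (tok or '').upper() if c.isalpha()]
--     r = _dec_rev(s[::-1])[::-1]
--     return ''.join(r) or 'A'
--
--
-- def _dec_rev(rev):
--     # bijective base-26 decrement as an odometer, digits least-significant first:
--     # borrow through 'A's (-> 'Z'); a borrow past the leading digit drops it.
--     if not rev:
--         return []
--     c, rest = rev[0], rev[1:]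
--     if c == 'A':
--         return [] if not rest else ['Z'] + _dec_rev(rest)
--     return [chr(ord(c) - 1)] + rest
-- ===== Notes on version B (the rewrite author's own statement) =====
-- stated objective: faster
-- what changed: B replaces A's decode-to-integer / subtract-one / re-encode round trip with an in-place bijective base-26 odometer decrement over the cleaned characters (borrow 'A'->'Z' from the right, drop the leading digit on full borrow), never converting to an integer.
import Mathlib
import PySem

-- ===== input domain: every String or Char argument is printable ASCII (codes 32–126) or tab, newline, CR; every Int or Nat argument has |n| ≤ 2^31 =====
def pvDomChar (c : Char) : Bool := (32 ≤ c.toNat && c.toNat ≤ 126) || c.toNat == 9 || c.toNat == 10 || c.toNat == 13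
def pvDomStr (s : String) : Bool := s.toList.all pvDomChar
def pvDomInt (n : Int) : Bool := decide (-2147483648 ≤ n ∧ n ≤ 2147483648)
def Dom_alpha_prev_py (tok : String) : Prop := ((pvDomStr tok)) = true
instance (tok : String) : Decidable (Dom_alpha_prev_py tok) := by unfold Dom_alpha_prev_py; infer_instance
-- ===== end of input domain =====

-- B replaces A's decode-to-int / subtract / re-encode round trip by an odometer decrement on the digit string (alternative algorithm, no integer conversion).

-- ===== PORT A =====
-- string.ascii_uppercase
def pyAlpha : List Char :=
  ['A','B','C','D','E','F','G','H','I','J','K','L','M','N','O','P','Q','R','S','T','U','V','W','X','Y','Z']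

-- the 'while n > 0' encode loop; _ALPHA[rem] is in range (0 ≤ rem < 26), so pyGetD is exact here
def pyEncLoop (n : Int) (out : List Char) : List Char :=
  if h : 0 < n then
    have := h
    pyEncLoop (PySem.Int.floordiv (n - 1) 26)
      (out ++ [PySem.List.pyGetD pyAlpha (PySem.Int.mod (n - 1) 26) 'A'])
  else out
termination_by n.toNat
decreasing_by
  have he : PySem.Int.floordiv (n - 1) 26 = (n - 1) / 26 :=
    PySem.Int.floordiv_eq_ediv_of_pos (by norm_num)
  have h1 : (n - 1) / 26 ≤ n - 1 := Int.ediv_le_self _ (by omega)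
  have h2 : 0 ≤ (n - 1) / 26 := Int.ediv_nonneg (by omega) (by norm_num)
  rw [he]; omega

-- _ALPHA.index(ch) is ported as PySem.Chars.find (ch is always a cleaned uppercase letter, so it is found and index = find)
def alpha_prev_py (tok : String) : String :=
  let s : List Char := ((PySem.Str.upper tok).toList).filter PySem.Chars.isalpha
  if s = [] then "A"
  else
    let n : Int := s.foldl (fun n ch => n * 26 + (PySem.Chars.find pyAlpha [ch] + 1)) 0
    if n ≤ 1 then "A"
    else String.ofList (pyEncLoop (n - 1) []).reverse

-- ===== PORT B =====
-- _dec_rev from Source B: bijective base-26 decrement, digits least-significant first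
def decRevB : List Char → List Char
  | [] => []
  | c :: rest =>
    if c = 'A' then
      match rest with
      | [] => []
      | _ :: _ => 'Z' :: decRevB rest
    else Char.ofNat (c.toNat - 1) :: rest

def alpha_prev_py_alt (tok : String) : String :=
  let s : List Char := ((PySem.Str.upper tok).toList).filter PySem.Chars.isalpha
  let r : List Char := (decRevB s.reverse).reverse
  if r = [] then "A" else String.ofList r

-- ===== PRECONDITION & SPEC =====
def Spec_alpha_prev_py (tok : String) (out : String) : Prop := out = alpha_prev_py_alt tok
instance (tok : String) (out : String) : Decidable (Spec_alpha_prev_py tok out) := by unfold Spec_alpha_prev_py; infer_instance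

-- ===== CLAIM (what is proved, stated in full; the proofs are below) =====
def Claim_equal_alpha_prev_py : Prop := ∀ (tok : String), Dom_alpha_prev_py tok → Spec_alpha_prev_py tok (alpha_prev_py tok)

-- ===== LEMMAS AND PROOFS =====

-- a cleaned digit: an uppercase ASCII letter
def validC (c : Char) : Prop := 65 ≤ c.toNat ∧ c.toNat ≤ 90

-- its value as a bijective base-26 digit, 1..26
def valC (c : Char) : Int := (c.toNat : Int) - 64

-- value of a digit list, least-significant digit first
def decR : List Char → Int
  | [] => 0
  | c :: rest => valC c + 26 * decR rest

lemma valC_bounds {c : Char} (h : validC c) : 1 ≤ valC c ∧ valC c ≤ 26 := by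
  obtain ⟨h1, h2⟩ := h; unfold valC; omega

lemma islower_iff (c : Char) : PySem.Chars.islower c = true ↔ 97 ≤ c.toNat ∧ c.toNat ≤ 122 := by
  simp only [PySem.Chars.islower, Bool.and_eq_true, decide_eq_true_eq, Char.le_def,
    UInt32.le_iff_toNat_le]
  rfl

lemma isupper_iff (c : Char) : PySem.Chars.isupper c = true ↔ 65 ≤ c.toNat ∧ c.toNat ≤ 90 := by
  simp only [PySem.Chars.isupper, Bool.and_eq_true, decide_eq_true_eq, Char.le_def,
    UInt32.le_iff_toNat_le]
  rfl

lemma toNat_ofNat_small {n : Nat} (h : n < 55296) : (Char.ofNat n).toNat = n := by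
  rw [Char.toNat_ofNat, if_pos (Or.inl h)]

lemma eq_A_of_toNat {c : Char} (h : c.toNat = 65) : c = 'A' := by
  rw [← Char.ofNat_toNat c, h]

lemma clean_valid (tok : String) :
    ∀ c ∈ ((PySem.Str.upper tok).toList).filter PySem.Chars.isalpha, validC c := by
  intro c hc
  rw [List.mem_filter] at hc
  obtain ⟨hmem, halpha⟩ := hc
  rw [PySem.Str.toList_upper, PySem.Chars.upper, List.mem_map] at hmem
  obtain ⟨c₀, _, rfl⟩ := hmem
  unfold PySem.Chars.upperChar at halpha ⊢
  by_cases hl : PySem.Chars.islower c₀ = true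
  · rw [if_pos hl] at halpha ⊢
    obtain ⟨ha, hb⟩ := (islower_iff c₀).mp hl
    have ht : (Char.ofNat (c₀.toNat - 32)).toNat = c₀.toNat - 32 :=
      toNat_ofNat_small (by omega)
    exact ⟨by rw [ht]; omega, by rw [ht]; omega⟩
  · rw [if_neg hl] at halpha ⊢
    unfold PySem.Chars.isalpha at halpha
    rw [Bool.or_eq_true] at halpha
    rcases halpha with h | h
    · exact (isupper_iff c₀).mp h
    · exact absurd h hl

lemma find_pyAlpha {c : Char} (h : validC c) :
    PySem.Chars.find pyAlpha [c] = (c.toNat : Int) - 65 := by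
  obtain ⟨h1, h2⟩ := h
  obtain ⟨k, hk1, hk2, rfl⟩ : ∃ k, 65 ≤ k ∧ k ≤ 90 ∧ c = Char.ofNat k :=
    ⟨c.toNat, h1, h2, (Char.ofNat_toNat c).symm⟩
  interval_cases k <;> decide

lemma pyGetD_pyAlpha {r : Int} (h0 : 0 ≤ r) (h26 : r < 26) :
    PySem.List.pyGetD pyAlpha r 'A' = Char.ofNat (65 + r.toNat) := by
  obtain ⟨k, hk, rfl⟩ : ∃ k : Nat, k < 26 ∧ r = (k : Int) := ⟨r.toNat, by omega, by omega⟩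
  interval_cases k <;> decide

lemma valid_pred {c : Char} (h : validC c) (hne : c ≠ 'A') :
    validC (Char.ofNat (c.toNat - 1)) ∧ valC (Char.ofNat (c.toNat - 1)) = valC c - 1 := by
  obtain ⟨h1, h2⟩ := h
  have h65 : c.toNat ≠ 65 := fun he => hne (eq_A_of_toNat he)
  have ht : (Char.ofNat (c.toNat - 1)).toNat = c.toNat - 1 := toNat_ofNat_small (by omega)
  refine ⟨⟨?_, ?_⟩, ?_⟩
  · rw [ht]; omega
  · rw [ht]; omega
  · unfold valC; rw [ht]; omega

-- the fold of port A computes decR of the reversed digit list (digits are read most-significant first)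
lemma foldl_rev_decR (rev : List Char) (hv : ∀ c ∈ rev, validC c) : ∀ init : Int,
    (rev.reverse).foldl (fun n ch => n * 26 + (PySem.Chars.find pyAlpha [ch] + 1)) init
      = init * 26 ^ rev.length + decR rev := by
  induction rev with
  | nil => intro init; simp [decR]
  | cons c rest ih =>
    intro init
    have hvc : validC c := hv c (List.mem_cons_self ..)
    have hvr : ∀ x ∈ rest, validC x := fun x hx => hv x (List.mem_cons_of_mem _ hx)
    simp only [List.reverse_cons, List.foldl_append, List.foldl_cons, List.foldl_nil]
    rw [ih hvr init, find_pyAlpha hvc]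
    simp only [decR, valC, List.length_cons]
    ring

lemma decR_nonneg {rev : List Char} (hv : ∀ c ∈ rev, validC c) : 0 ≤ decR rev := by
  induction rev with
  | nil => simp [decR]
  | cons c rest ih =>
    have := valC_bounds (hv c (List.mem_cons_self ..))
    have := ih (fun x hx => hv x (List.mem_cons_of_mem _ hx))
    simp only [decR]; omega

lemma decR_pos {rev : List Char} (hv : ∀ c ∈ rev, validC c) (hne : rev ≠ []) :
    1 ≤ decR rev := by
  cases rev with
  | nil => exact absurd rfl hne
  | cons c rest =>
    have := valC_bounds (hv c (List.mem_cons_self ..))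
    have := decR_nonneg (fun x hx => hv x (List.mem_cons_of_mem _ hx))
    simp only [decR]; omega

lemma decR_eq_one {rev : List Char} (hv : ∀ c ∈ rev, validC c) (hne : rev ≠ [])
    (h1 : decR rev = 1) : rev = ['A'] := by
  cases rev with
  | nil => exact absurd rfl hne
  | cons c rest =>
    have hb := valC_bounds (hv c (List.mem_cons_self ..))
    have hvr : ∀ x ∈ rest, validC x := fun x hx => hv x (List.mem_cons_of_mem _ hx)
    have hr0 : 0 ≤ decR rest := decR_nonneg hvr
    simp only [decR] at h1
    have hrest : rest = [] := by
      by_contra hne'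
      have := decR_pos hvr hne'
      omega
    have hc : c = 'A' := eq_A_of_toNat (by
      have : valC c = 1 := by rw [hrest] at h1; simp [decR] at h1; omega
      unfold valC at this; omega)
    simp [hrest, hc]

-- the odometer decrement is exactly "value minus one", stays valid and nonempty
lemma decRevB_spec {rev : List Char} (hv : ∀ c ∈ rev, validC c) (h2 : 2 ≤ decR rev) :
    decR (decRevB rev) = decR rev - 1 ∧ (∀ c ∈ decRevB rev, validC c) ∧ decRevB rev ≠ [] := by
  induction rev with
  | nil => simp [decR] at h2
  | cons c rest ih =>
    have hvc : validC c := hv c (List.mem_cons_self ..)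
    have hvr : ∀ x ∈ rest, validC x := fun x hx => hv x (List.mem_cons_of_mem _ hx)
    have hbc := valC_bounds hvc
    have hr0 : 0 ≤ decR rest := decR_nonneg hvr
    by_cases hA : c = 'A'
    · subst hA
      have hvalA : valC 'A' = 1 := by decide
      cases rest with
      | nil => simp only [decR, hvalA] at h2; omega
      | cons d rest' =>
        have hrest1 : 1 ≤ decR (d :: rest') := decR_pos hvr (by simp)
        by_cases hone : decR (d :: rest') = 1
        · have heq : d :: rest' = ['A'] := decR_eq_one hvr (by simp) hone
          rw [heq]
          refine ⟨by decide, ?_, by decide⟩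
          intro x hx
          have : x = 'Z' := by
            have : decRevB ['A', 'A'] = ['Z'] := by decide
            rw [this] at hx; simpa using hx
          subst this; exact ⟨by decide, by decide⟩
        · have h2' : 2 ≤ decR (d :: rest') := by omega
          obtain ⟨ihv, ihvalid, ihne⟩ := ih hvr h2'
          have hstep : decRevB ('A' :: d :: rest') = 'Z' :: decRevB (d :: rest') := by
            simp [decRevB]
          rw [hstep]
          refine ⟨?_, ?_, by simp⟩
          · have hZ : valC 'Z' = 26 := by decide
            simp only [decR, hvalA, hZ, ihv]
            ring
          · intro x hx
            rcases List.mem_cons.mp hx with h | h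
            · subst h; exact ⟨by decide, by decide⟩
            · exact ihvalid x h
    · have hstep : decRevB (c :: rest) = Char.ofNat (c.toNat - 1) :: rest := by
        simp [decRevB, hA]
      obtain ⟨hvp, hvalp⟩ := valid_pred hvc hA
      rw [hstep]
      refine ⟨?_, ?_, by simp⟩
      · simp only [decR, hvalp]; ring
      · intro x hx
        rcases List.mem_cons.mp hx with h | h
        · subst h; exact hvp
        · exact hvr x h

-- port A's encode loop undoes decR: it reproduces the digits least-significant first
lemma pyEncLoop_decR {rev : List Char} (hv : ∀ c ∈ rev, validC c) : ∀ out : List Char,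
    pyEncLoop (decR rev) out = out ++ rev := by
  induction rev with
  | nil => intro out; rw [pyEncLoop]; simp [decR]
  | cons c rest ih =>
    intro out
    have hvc : validC c := hv c (List.mem_cons_self ..)
    have hvr : ∀ x ∈ rest, validC x := fun x hx => hv x (List.mem_cons_of_mem _ hx)
    have hbc := valC_bounds hvc
    have hr0 : 0 ≤ decR rest := decR_nonneg hvr
    have hpos : 0 < decR (c :: rest) := by simp only [decR]; omega
    rw [pyEncLoop, dif_pos hpos]
    have hsub : decR (c :: rest) - 1 = 26 * decR rest + (valC c - 1) := by
      simp only [decR]; ring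
    have hq : PySem.Int.floordiv (decR (c :: rest) - 1) 26 = decR rest := by
      rw [hsub, PySem.Int.floordiv_eq_iff_of_pos (by norm_num)]
      constructor <;> omega
    have hm : PySem.Int.mod (decR (c :: rest) - 1) 26 = valC c - 1 := by
      have := PySem.Int.floordiv_mul_add_mod (decR (c :: rest) - 1) 26
      rw [hq] at this; omega
    rw [hq, hm]
    have hget : PySem.List.pyGetD pyAlpha (valC c - 1) 'A' = c := by
      rw [pyGetD_pyAlpha (by omega) (by omega)]
      have ht : (valC c - 1).toNat = c.toNat - 65 := by unfold valC at *; omega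
      have h65 : 65 + (c.toNat - 65) = c.toNat := by obtain ⟨a, b⟩ := hvc; omega
      rw [ht, h65, Char.ofNat_toNat]
    rw [hget, ih hvr]
    simp

-- ===== VERDICT (by name: the statement is the Claim_ definition above) =====
theorem alpha_prev_py_spec : Claim_equal_alpha_prev_py := by
  intro tok _
  unfold Spec_alpha_prev_py alpha_prev_py alpha_prev_py_alt
  have hv := clean_valid tok
  generalize hs : ((PySem.Str.upper tok).toList).filter PySem.Chars.isalpha = s at *
  simp only []
  by_cases hnil : s = []
  · subst hnil; simp [decRevB]
  · rw [if_neg hnil]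
    have hvrev : ∀ c ∈ s.reverse, validC c := fun c hc => hv c (List.mem_reverse.mp hc)
    have hfold := foldl_rev_decR s.reverse hvrev 0
    rw [List.reverse_reverse] at hfold
    set n : Int := s.foldl (fun n ch => n * 26 + (PySem.Chars.find pyAlpha [ch] + 1)) 0 with hn
    have hdec : n = decR s.reverse := by rw [hfold]; ring
    have hrevne : s.reverse ≠ [] := by simp [hnil]
    have hpos : 1 ≤ decR s.reverse := decR_pos hvrev hrevne
    by_cases hle : n ≤ 1
    · rw [if_pos hle]
      have h1 : decR s.reverse = 1 := by omega
      have hA : s.reverse = ['A'] := decR_eq_one hvrev hrevne h1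
      rw [hA]
      simp [decRevB]
    · rw [if_neg hle]
      have h2 : 2 ≤ decR s.reverse := by omega
      obtain ⟨hval, hvalid, hne⟩ := decRevB_spec hvrev h2
      have henc : pyEncLoop (n - 1) [] = decRevB s.reverse := by
        rw [hdec, ← hval, pyEncLoop_decR hvalid]
        simp
      rw [henc, if_neg (by simp [hne])]
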